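-- pv_equiv track=rewrite | github.com/mrsxman/asadshakx_sh | massiv.py | uzunlik_K_seriyalarini_nolga_almashtirish
-- ===== SOURCE A (Python) =====
-- def uzunlik_K_seriyalarini_nolga_almashtirish(massiv, K):
--     n = len(massiv)
--     new_massiv = []
--
--     i = 0
--     while i < n:
--         # Seriyani topish
--         seriya_uzunligi = 0
--         while i + seriya_uzunligi < n and seriya_uzunligi < K:
--             seriya_uzunligi += 1
--
--         # Seriya uzunligi K ga teng bo'lsa, bitta elementni nolga almashtirish
--         if seriya_uzunligi == K:
--             new_massiv.append(0)
--         else: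
--             new_massiv.extend(massiv[i:i + seriya_uzunligi])
--
--         i += seriya_uzunligi
--
--     return new_massiv
-- ===== SOURCE B (Python) =====
-- def uzunlik_K_seriyalarini_nolga_almashtirish(massiv, K):
--     n = len(massiv)
--     return [0] * (n // K) + list(massiv[n - n % K:])
-- ===== Notes on version B (the rewrite author's own statement) =====
-- stated objective: simpler
-- what changed: Replaced the nested while-loops (inner loop counting a run of length K, outer loop scanning blocks) by a closed-form construction: n // K zeros followed by the trailing n % K elements.
-- outside the precondition, e.g. on uzunlik_K_seriyalarini_nolga_almashtirish([], 0): A returns [], B raises ZeroDivisionError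
import Mathlib
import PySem

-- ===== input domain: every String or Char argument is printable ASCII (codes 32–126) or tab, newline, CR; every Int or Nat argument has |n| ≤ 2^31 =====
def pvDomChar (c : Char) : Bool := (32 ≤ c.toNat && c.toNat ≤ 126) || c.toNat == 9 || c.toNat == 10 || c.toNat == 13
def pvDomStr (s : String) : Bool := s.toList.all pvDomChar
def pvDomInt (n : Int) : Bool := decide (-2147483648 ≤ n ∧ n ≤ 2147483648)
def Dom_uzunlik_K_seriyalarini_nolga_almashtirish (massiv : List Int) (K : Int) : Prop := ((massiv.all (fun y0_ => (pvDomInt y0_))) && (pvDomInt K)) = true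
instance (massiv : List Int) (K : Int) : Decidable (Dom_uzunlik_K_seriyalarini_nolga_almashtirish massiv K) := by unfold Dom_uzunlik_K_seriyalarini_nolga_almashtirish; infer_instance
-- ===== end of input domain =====

-- B replaces A's nested block-scanning loops by a closed-form construction
-- (n // K zeros, then the trailing n % K elements); equivalence is proved for
-- all inputs on which A terminates (K > 0, or an empty list with K < 0).

-- ===== PORT A =====
-- inner while loop: 'while i + s < n and s < K: s += 1'
def pvInnerA (n i K s : Int) : Int :=
  if _h : i + s < n ∧ s < K then pvInnerA n i K (s + 1) else s
termination_by (n - (i + s)).toNat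
decreasing_by omega

-- outer while loop: 'while i < n: …'; fuel only totalizes the loop (Python A
-- diverges for K ≤ 0 on a nonempty list; those inputs are outside Pre_)
def pvOuterA (massiv : List Int) (n K : Int) : Nat → Int → List Int → List Int
  | 0, _, acc => acc
  | fuel + 1, i, acc =>
    if i < n then
      let L := pvInnerA n i K 0
      let acc2 := if L = K then acc ++ [0]
                  else acc ++ PySem.List.slice massiv (some i) (some (i + L))
      pvOuterA massiv n K fuel (i + L) acc2
    else acc

def uzunlik_K_seriyalarini_nolga_almashtirish (massiv : List Int) (K : Int) : List Int :=
  pvOuterA massiv (massiv.length : Int) K (massiv.length + 1) 0 []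

-- ===== PORT B =====
def uzunlik_K_seriyalarini_nolga_almashtirish_alt (massiv : List Int) (K : Int) : List Int :=
  let n : Int := massiv.length
  List.replicate (PySem.Int.floordiv n K).toNat 0
    ++ PySem.List.slice massiv (some (n - PySem.Int.mod n K)) none

-- ===== PRECONDITION & SPEC =====
-- Pre_ excludes exactly the inputs where Python A does not return normally or B raises:
-- for K ≤ 0 and a nonempty list A loops forever, and for K = 0 B raises ZeroDivisionError.
def Pre_uzunlik_K_seriyalarini_nolga_almashtirish (massiv : List Int) (K : Int) : Prop :=
  0 < K ∨ (massiv = [] ∧ K < 0)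
instance (massiv : List Int) (K : Int) : Decidable (Pre_uzunlik_K_seriyalarini_nolga_almashtirish massiv K) := by
  unfold Pre_uzunlik_K_seriyalarini_nolga_almashtirish; infer_instance

def pvWitness_uzunlik_K_seriyalarini_nolga_almashtirish : List Int × Int := ([1, 2, 3], 2)

def Spec_uzunlik_K_seriyalarini_nolga_almashtirish (massiv : List Int) (K : Int) (out : List Int) : Prop := out = uzunlik_K_seriyalarini_nolga_almashtirish_alt massiv K
instance (massiv : List Int) (K : Int) (out : List Int) : Decidable (Spec_uzunlik_K_seriyalarini_nolga_almashtirish massiv K out) := by unfold Spec_uzunlik_K_seriyalarini_nolga_almashtirish; infer_instance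

-- ===== CLAIM (what is proved, stated in full; the proofs are below) =====
def Claim_equal_uzunlik_K_seriyalarini_nolga_almashtirish : Prop := ∀ (massiv : List Int) (K : Int), Dom_uzunlik_K_seriyalarini_nolga_almashtirish massiv K → Pre_uzunlik_K_seriyalarini_nolga_almashtirish massiv K → Spec_uzunlik_K_seriyalarini_nolga_almashtirish massiv K (uzunlik_K_seriyalarini_nolga_almashtirish massiv K)

-- ===== LEMMAS AND PROOFS =====

-- the inner loop computes min (n - i) K once s starts below both bounds
theorem pvInnerA_eq_min (n i K s : Int) (h1 : s ≤ n - i) (h2 : s ≤ K) :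
    pvInnerA n i K s = min (n - i) K := by
  rw [pvInnerA]
  split_ifs with h
  · exact pvInnerA_eq_min n i K (s + 1) (by omega) (by omega)
  · omega
termination_by (n - (i + s)).toNat
decreasing_by omega

theorem pvOuterA_eq (massiv : List Int) (K : Int) (hK : 0 < K) :
    ∀ (fuel : Nat) (i : Int) (acc : List Int), 0 ≤ i → i ≤ (massiv.length : Int) →
      ((massiv.length : Int) - i).toNat ≤ fuel →
      pvOuterA massiv (massiv.length : Int) K fuel i acc =
        acc ++ List.replicate (PySem.Int.floordiv ((massiv.length : Int) - i) K).toNat 0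
            ++ PySem.List.slice massiv
                 (some ((massiv.length : Int) - PySem.Int.mod ((massiv.length : Int) - i) K)) none := by
  intro fuel
  induction fuel with
  | zero =>
      intro i acc h0 hle hf
      have hi : i = (massiv.length : Int) := by omega
      subst hi
      simp [pvOuterA, PySem.Int.floordiv_eq_ediv_of_pos hK, PySem.Int.mod_eq_emod_of_pos hK]
  | succ fuel ih =>
      intro i acc h0 hle hf
      by_cases hi : i < (massiv.length : Int)
      · have hL : pvInnerA (massiv.length : Int) i K 0 = min ((massiv.length : Int) - i) K :=
          pvInnerA_eq_min _ _ _ 0 (by omega) (by omega)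
        rw [pvOuterA]
        simp only [hi, if_true, hL]
        by_cases hcase : K ≤ (massiv.length : Int) - i
        · -- full block: min = K, append 0, recurse at i + K
          have hmin : min ((massiv.length : Int) - i) K = K := by omega
          rw [hmin, if_pos rfl, ih (i + K) (acc ++ [0]) (by omega) (by omega) (by omega)]
          have e1 : (massiv.length : Int) - (i + K) = ((massiv.length : Int) - i - K) := by ring
          rw [e1]
          have hd : PySem.Int.floordiv ((massiv.length : Int) - i) K
              = PySem.Int.floordiv ((massiv.length : Int) - i - K) K + 1 := by
            rw [PySem.Int.floordiv_eq_ediv_of_pos hK, PySem.Int.floordiv_eq_ediv_of_pos hK]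
            have e : (massiv.length : Int) - i = ((massiv.length : Int) - i - K) + 1 * K := by
              ring
            conv_lhs => rw [e]
            rw [Int.add_mul_ediv_right _ _ (by omega : K ≠ 0)]
          have hm : PySem.Int.mod ((massiv.length : Int) - i) K
              = PySem.Int.mod ((massiv.length : Int) - i - K) K := by
            rw [PySem.Int.mod_eq_emod_of_pos hK, PySem.Int.mod_eq_emod_of_pos hK]
            exact (Int.sub_emod_right ((massiv.length : Int) - i) K).symm
          have hq : 0 ≤ PySem.Int.floordiv ((massiv.length : Int) - i - K) K := by
            rw [PySem.Int.floordiv_eq_ediv_of_pos hK]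
            exact Int.ediv_nonneg (by omega) (by omega)
          rw [hd, hm]
          have ht : (PySem.Int.floordiv ((massiv.length : Int) - i - K) K + 1).toNat
              = (PySem.Int.floordiv ((massiv.length : Int) - i - K) K).toNat + 1 := by omega
          rw [ht, List.replicate_succ]
          simp
        · -- partial trailing block: min = n - i < K, append the tail, recurse at n
          have hmin : min ((massiv.length : Int) - i) K = (massiv.length : Int) - i := by omega
          have hne : ¬ ((massiv.length : Int) - i = K) := by omega
          have e0 : i + ((massiv.length : Int) - i) = (massiv.length : Int) := by ring
          rw [hmin, if_neg hne, e0,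
            ih ((massiv.length : Int)) _ (by omega) (by omega) (by omega)]
          have hd0 : PySem.Int.floordiv ((massiv.length : Int) - i) K = 0 := by
            rw [PySem.Int.floordiv_eq_ediv_of_pos hK]
            exact Int.ediv_eq_zero_of_lt (by omega) (by omega)
          have hm0 : PySem.Int.mod ((massiv.length : Int) - i) K = (massiv.length : Int) - i := by
            rw [PySem.Int.mod_eq_emod_of_pos hK]
            exact Int.emod_eq_of_lt (by omega) (by omega)
          have hdz : PySem.Int.floordiv ((massiv.length : Int) - (massiv.length : Int)) K = 0 := by
            simp [PySem.Int.floordiv_eq_ediv_of_pos hK]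
          have hmz : PySem.Int.mod ((massiv.length : Int) - (massiv.length : Int)) K = 0 := by
            simp [PySem.Int.mod_eq_emod_of_pos hK]
          rw [hdz, hmz, hd0, hm0]
          obtain ⟨k, rfl⟩ := Int.eq_ofNat_of_zero_le h0
          have hslice : PySem.List.slice massiv (some ((k : Int))) (some ((massiv.length : Int))) =
              PySem.List.slice massiv (some ((massiv.length : Int) - ((massiv.length : Int) - (k : Int)))) none := by
            have e2 : (massiv.length : Int) - ((massiv.length : Int) - (k : Int)) = (k : Int) := by ring
            rw [e2, PySem.List.slice_natCast, PySem.List.slice_from_natCast]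
            apply List.take_of_length_le
            simp
          have hz : PySem.List.slice massiv (some ((massiv.length : Int) - 0)) none = [] := by
            rw [show (massiv.length : Int) - 0 = ((massiv.length : Int)) by ring,
              PySem.List.slice_from_natCast]
            simp
          rw [hslice, hz]
          simp
      · have hi' : i = (massiv.length : Int) := by omega
        subst hi'
        rw [pvOuterA]
        simp [PySem.Int.floordiv_eq_ediv_of_pos hK, PySem.Int.mod_eq_emod_of_pos hK]

-- ===== VERDICT (by name: the statement is the Claim_ definition above) =====
theorem uzunlik_K_seriyalarini_nolga_almashtirish_spec : Claim_equal_uzunlik_K_seriyalarini_nolga_almashtirish := by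
  intro massiv K _hDom hPre
  unfold Spec_uzunlik_K_seriyalarini_nolga_almashtirish
  rcases hPre with hK | ⟨hnil, hKneg⟩
  · unfold uzunlik_K_seriyalarini_nolga_almashtirish uzunlik_K_seriyalarini_nolga_almashtirish_alt
    rw [pvOuterA_eq massiv K hK (massiv.length + 1) 0 [] (by omega) (by simp) (by omega)]
    simp
  · subst hnil
    unfold uzunlik_K_seriyalarini_nolga_almashtirish uzunlik_K_seriyalarini_nolga_almashtirish_alt
    simp [pvOuterA, PySem.Int.floordiv, PySem.Int.mod, PySem.List.slice]
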